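-- pv_equiv track=rewrite | github.com/Aaron349899401/myprograms | ccc/ccc_sim3.py | infec
-- ===== SOURCE A (Python) =====
-- def infec(n, k, infected, d):
--     line = [False] * (n + 1)
--     for p in infected:
--         l = max(1, p - d) # makes sure l does not go out of bounds (1 to n)
--         r = min(n, p + d)
--         for i in range(l, r + 1):
--             line[i] = True
--     return sum(line)
-- ===== SOURCE B (Python) =====
-- def infec(n, k, infected, d):
--     # clamp each infected point to its covered interval, sort by left end, merge, sum lengths
--     ivs = sorted(((max(1, p - d), min(n, p + d)) for p in infected), key=lambda t: t[0])
--     total = 0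
--     cur = None
--     for l, r in ivs:
--         if r < l:
--             continue
--         if cur is None:
--             cur = (l, r)
--         elif l > cur[1] + 1:
--             total += cur[1] - cur[0] + 1
--             cur = (l, r)
--         elif r > cur[1]:
--             cur = (cur[0], r)
--     if cur is not None:
--         total += cur[1] - cur[0] + 1
--     return total
-- ===== Notes on version B (the rewrite author's own statement) =====
-- stated objective: faster
-- what changed: Instead of allocating an (n+1)-slot boolean line and marking every position of every infected point's clamped interval, B sorts the k clamped intervals by left end and merges overlapping/adjacent ones in one pass, summing merged lengths.
import Mathlib
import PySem

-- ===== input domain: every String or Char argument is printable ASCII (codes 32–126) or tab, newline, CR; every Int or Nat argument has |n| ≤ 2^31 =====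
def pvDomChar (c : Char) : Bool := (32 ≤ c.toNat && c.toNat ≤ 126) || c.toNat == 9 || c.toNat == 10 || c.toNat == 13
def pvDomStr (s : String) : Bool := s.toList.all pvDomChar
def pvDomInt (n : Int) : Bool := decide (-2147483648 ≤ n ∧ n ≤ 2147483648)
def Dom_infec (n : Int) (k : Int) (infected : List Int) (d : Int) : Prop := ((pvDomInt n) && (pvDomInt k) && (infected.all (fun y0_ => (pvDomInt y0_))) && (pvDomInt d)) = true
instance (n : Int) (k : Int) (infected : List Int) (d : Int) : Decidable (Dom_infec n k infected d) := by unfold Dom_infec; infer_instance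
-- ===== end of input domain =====

-- B replaces A's per-position boolean marking (O(k·d + n)) by sort-and-merge of the k
-- clamped intervals (O(k log k)); equivalence of the return value is proved below.

-- ===== PORT A =====
-- literal port: line = [False]*(n+1); mark line[i] for i in range(l, r+1); sum(line).
-- line[i] = True is ported as List.set i.toNat; exact here since every generated index
-- satisfies 1 ≤ i ≤ n < line.length (so no IndexError in Python, no clamp here).
def infec (n : Int) (k : Int) (infected : List Int) (d : Int) : Int :=
  let line0 := List.replicate (n + 1).toNat false
  let line := infected.foldl (fun line p =>
      let l := max 1 (p - d)
      let r := min n (p + d)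
      (PySem.List.pyRange l (r + 1) 1).foldl (fun ln i => ln.set i.toNat true) line) line0
  line.foldl (fun acc b => acc + (if b then 1 else 0)) 0

-- ===== PORT B =====
-- the merge loop of Source B, with the final 'if cur is not None: total += …' flush in the base case
def infecAltGo : List (Int × Int) → Int → Option (Int × Int) → Int
  | [], total, none => total
  | [], total, some (cl, cr) => total + (cr - cl + 1)
  | (l, r) :: ys, total, cur =>
    if r < l then infecAltGo ys total cur
    else
      match cur with
      | none => infecAltGo ys total (some (l, r))
      | some (cl, cr) =>
        if l > cr + 1 then infecAltGo ys (total + (cr - cl + 1)) (some (l, r))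
        else if r > cr then infecAltGo ys total (some (cl, r))
        else infecAltGo ys total (some (cl, cr))

def infec_alt (n : Int) (k : Int) (infected : List Int) (d : Int) : Int :=
  let ivs := PySem.List.sorted (infected.map (fun p => (max 1 (p - d), min n (p + d))))
      (fun t => t.1) false
  infecAltGo ivs 0 none

-- ===== PRECONDITION & SPEC =====
def Spec_infec (n : Int) (k : Int) (infected : List Int) (d : Int) (out : Int) : Prop := out = infec_alt n k infected d
instance (n : Int) (k : Int) (infected : List Int) (d : Int) (out : Int) : Decidable (Spec_infec n k infected d out) := by unfold Spec_infec; infer_instance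

-- ===== CLAIM (what is proved, stated in full; the proofs are below) =====
def Claim_equal_infec : Prop := ∀ (n : Int) (k : Int) (infected : List Int) (d : Int), Dom_infec n k infected d → Spec_infec n k infected d (infec n k infected d)

-- ===== LEMMAS AND PROOFS =====

-- a closed integer interval as a (computable) finset, and covered positions of a list of intervals
def ivF (l r : Int) : Finset Int := (PySem.List.pyRange l (r + 1) 1).toFinset

theorem mem_ivF (x l r : Int) : x ∈ ivF l r ↔ l ≤ x ∧ x ≤ r := by
  simp [ivF, PySem.List.mem_pyRange_one]

theorem card_ivF (l r : Int) (h : l ≤ r) : ((ivF l r).card : Int) = r - l + 1 := by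
  rw [ivF, List.toFinset_card_of_nodup (PySem.List.nodup_pyRange_one _ _)]
  rw [PySem.List.length_pyRange_one]
  omega

theorem ivF_empty (l r : Int) (h : r < l) : ivF l r = ∅ := by
  apply Finset.ext; intro x; simp [mem_ivF]; omega

def ivU : List (Int × Int) → Finset Int
  | [] => ∅
  | iv :: t => ivF iv.1 iv.2 ∪ ivU t

theorem mem_ivU (x : Int) (ivs : List (Int × Int)) :
    x ∈ ivU ivs ↔ ∃ iv ∈ ivs, iv.1 ≤ x ∧ x ≤ iv.2 := by
  induction ivs with
  | nil => simp [ivU]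
  | cons iv t ih => simp [ivU, ih, mem_ivF]

theorem ivU_perm {ivs₁ ivs₂ : List (Int × Int)} (h : ivs₁.Perm ivs₂) :
    ivU ivs₁ = ivU ivs₂ := by
  apply Finset.ext; intro x
  simp only [mem_ivU]
  constructor
  · rintro ⟨iv, hm, h1, h2⟩; exact ⟨iv, h.mem_iff.mp hm, h1, h2⟩
  · rintro ⟨iv, hm, h1, h2⟩; exact ⟨iv, h.mem_iff.mpr hm, h1, h2⟩

-- ---- B side ----

theorem go_some (ys : List (Int × Int)) : ∀ (total cl cr : Int), cl ≤ cr →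
    ys.Pairwise (fun a b => a.1 ≤ b.1) → (∀ iv ∈ ys, cl ≤ iv.1) →
    infecAltGo ys total (some (cl, cr)) = total + ((ivF cl cr ∪ ivU ys).card : Int) := by
  induction ys with
  | nil =>
    intro total cl cr h _ _
    simp [infecAltGo, ivU, card_ivF cl cr h]
  | cons iv ys ih =>
    rcases iv with ⟨l, r⟩
    intro total cl cr hclcr hp hhead
    have hpt : ys.Pairwise (fun a b => a.1 ≤ b.1) := (List.pairwise_cons.mp hp).2
    have hrest : ∀ iv ∈ ys, l ≤ iv.1 := fun iv h => (List.pairwise_cons.mp hp).1 iv h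
    have hl : cl ≤ l := hhead (l, r) (List.mem_cons_self)
    have hheadt : ∀ iv ∈ ys, cl ≤ iv.1 := fun iv h => hhead iv (List.mem_cons_of_mem _ h)
    have hUcons : ivU ((l, r) :: ys) = ivF l r ∪ ivU ys := rfl
    simp only [infecAltGo]
    by_cases hrl : r < l
    · rw [if_pos hrl, ih total cl cr hclcr hpt hheadt, hUcons, ivF_empty l r hrl]
      simp
    · rw [if_neg hrl]
      push_neg at hrl
      by_cases hgap : l > cr + 1
      · rw [if_pos hgap, ih (total + (cr - cl + 1)) l r hrl hpt hrest]
        have hdisj : Disjoint (ivF cl cr) (ivF l r ∪ ivU ys) := by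
          rw [Finset.disjoint_left]
          intro x hx hx2
          rw [mem_ivF] at hx
          rw [Finset.mem_union, mem_ivF, mem_ivU] at hx2
          rcases hx2 with ⟨h1, h2⟩ | ⟨iv, hm, h1, h2⟩
          · omega
          · have := hrest iv hm; omega
        rw [hUcons, Finset.card_union_of_disjoint hdisj]
        have hc := card_ivF cl cr hclcr
        push_cast
        rw [hc]
        ring
      · rw [if_neg hgap]
        push_neg at hgap
        by_cases hr : r > cr
        · rw [if_pos hr, ih total cl r (by omega) hpt hheadt]
          have hset : ivF cl cr ∪ ivU ((l, r) :: ys) = ivF cl r ∪ ivU ys := by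
            apply Finset.ext; intro x
            rw [hUcons, ← Finset.union_assoc]
            by_cases hx : x ∈ ivU ys <;>
              simp [Finset.mem_union, mem_ivF, hx] <;> omega
          rw [hset]
        · rw [if_neg hr, ih total cl cr hclcr hpt hheadt]
          push_neg at hr
          have hset : ivF cl cr ∪ ivU ((l, r) :: ys) = ivF cl cr ∪ ivU ys := by
            apply Finset.ext; intro x
            rw [hUcons, ← Finset.union_assoc]
            by_cases hx : x ∈ ivU ys <;>
              simp [Finset.mem_union, mem_ivF, hx] <;> omega
          rw [hset]

theorem go_none (ys : List (Int × Int)) : ∀ (total : Int),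
    ys.Pairwise (fun a b => a.1 ≤ b.1) →
    infecAltGo ys total none = total + ((ivU ys).card : Int) := by
  induction ys with
  | nil => intro total _; simp [infecAltGo, ivU]
  | cons iv ys ih =>
    rcases iv with ⟨l, r⟩
    intro total hp
    have hpt : ys.Pairwise (fun a b => a.1 ≤ b.1) := (List.pairwise_cons.mp hp).2
    have hrest : ∀ iv ∈ ys, l ≤ iv.1 := fun iv h => (List.pairwise_cons.mp hp).1 iv h
    have hUcons : ivU ((l, r) :: ys) = ivF l r ∪ ivU ys := rfl
    simp only [infecAltGo]
    by_cases hrl : r < l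
    · rw [if_pos hrl, ih total hpt, hUcons, ivF_empty l r hrl]
      simp
    · rw [if_neg hrl]
      push_neg at hrl
      rw [go_some ys total l r hrl hpt hrest, hUcons]

theorem alt_eq_card (n k d : Int) (infected : List Int) :
    infec_alt n k infected d
      = ((ivU (infected.map (fun p => (max 1 (p - d), min n (p + d))))).card : Int) := by
  unfold infec_alt
  rw [go_none _ 0 (PySem.List.sorted_pairwise _ _)]
  rw [ivU_perm (PySem.List.sorted_perm _ _ _)]
  simp

-- ---- A side ----

theorem foldl_set_length (xs : List Int) : ∀ (line : List Bool),
    (xs.foldl (fun ln i => ln.set i.toNat true) line).length = line.length := by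
  induction xs with
  | nil => intro line; rfl
  | cons x xs ih =>
    intro line
    simpa [List.foldl_cons] using (ih (line.set x.toNat true)).trans (by simp)

theorem getD_set_true (line : List Bool) (kk j : Nat) :
    (((line.set kk true).getD j false) = true) ↔
      (line.getD j false = true ∨ (kk = j ∧ j < line.length)) := by
  rw [List.getD_eq_getElem?_getD, List.getD_eq_getElem?_getD, List.getElem?_set]
  by_cases h1 : kk = j
  · subst h1
    by_cases h2 : kk < line.length <;> simp [h2]
  · simp [h1]

theorem inner_getD (xs : List Int) : ∀ (line : List Bool) (j : Nat),
    ((xs.foldl (fun ln i => ln.set i.toNat true) line).getD j false = true) ↔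
      (line.getD j false = true ∨ ∃ i ∈ xs, i.toNat = j ∧ j < line.length) := by
  induction xs with
  | nil => intro line j; simp
  | cons i xs ih =>
    intro line j
    simp only [List.foldl_cons]
    rw [ih (line.set i.toNat true) j, getD_set_true]
    simp only [List.length_set, List.mem_cons]
    constructor
    · rintro ((h | h) | ⟨i', hi', h1, h2⟩)
      · exact Or.inl h
      · exact Or.inr ⟨i, Or.inl rfl, h.1, h.2⟩
      · exact Or.inr ⟨i', Or.inr hi', h1, h2⟩
    · rintro (h | ⟨i', (rfl | hi'), h1, h2⟩)
      · exact Or.inl (Or.inl h)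
      · exact Or.inl (Or.inr ⟨h1, h2⟩)
      · exact Or.inr ⟨i', hi', h1, h2⟩

theorem outer_getD (n d : Int) (ps : List Int) : ∀ (line : List Bool) (j : Nat),
    ((ps.foldl (fun line p =>
        (PySem.List.pyRange (max 1 (p - d)) ((min n (p + d)) + 1) 1).foldl
          (fun ln i => ln.set i.toNat true) line) line).getD j false = true) ↔
      (line.getD j false = true ∨
        ((j : Int) ∈ ivU (ps.map (fun p => (max 1 (p - d), min n (p + d)))) ∧ j < line.length)) := by
  induction ps with
  | nil => intro line j; simp [ivU]
  | cons p ps ih =>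
    intro line j
    simp only [List.foldl_cons, List.map_cons]
    rw [ih]
    rw [foldl_set_length]
    rw [inner_getD]
    have hmem : (∃ i ∈ PySem.List.pyRange (max 1 (p - d)) ((min n (p + d)) + 1) 1,
        i.toNat = j ∧ j < line.length) ↔
        ((max 1 (p - d) ≤ (j : Int) ∧ (j : Int) ≤ min n (p + d)) ∧ j < line.length) := by
      constructor
      · rintro ⟨i, hi, hij, hj⟩
        rw [PySem.List.mem_pyRange_one] at hi
        refine ⟨⟨by omega, by omega⟩, hj⟩
      · rintro ⟨⟨h1, h2⟩, hj⟩
        refine ⟨(j : Int), ?_, by omega, hj⟩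
        rw [PySem.List.mem_pyRange_one]
        omega
    rw [hmem]
    have hUcons : ((j : Int) ∈ ivU ((max 1 (p - d), min n (p + d)) ::
        ps.map (fun p => (max 1 (p - d), min n (p + d))))) ↔
        ((max 1 (p - d) ≤ (j : Int) ∧ (j : Int) ≤ min n (p + d)) ∨
          (j : Int) ∈ ivU (ps.map (fun p => (max 1 (p - d), min n (p + d))))) := by
      show (j : Int) ∈ ivF _ _ ∪ ivU _ ↔ _
      rw [Finset.mem_union, mem_ivF]
    rw [hUcons]
    tauto

theorem foldl_sum (line : List Bool) : ∀ (a : Int),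
    line.foldl (fun acc b => acc + (if b then 1 else 0)) a = a + (line.countP (fun b => b) : Int) := by
  induction line with
  | nil => intro a; simp
  | cons b t ih =>
    intro a
    cases b <;> simp [List.countP_cons, ih] <;> push_cast <;> ring

theorem countP_pos (line : List Bool) :
    line.countP (fun b => b) = (List.range line.length).countP (fun j => line.getD j false) := by
  induction line with
  | nil => rfl
  | cons b t ih =>
    simp [List.range_succ_eq_map, List.countP_cons, List.countP_map, Function.comp_def, ih]

theorem range_countP_card (L : Nat) (U : Finset Int)
    (hU : ∀ x ∈ U, 0 ≤ x ∧ x < (L : Int)) :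
    (List.range L).countP (fun (j : Nat) => decide ((j : Int) ∈ U)) = U.card := by
  rw [List.countP_eq_length_filter]
  have hnd : (((List.range L).filter (fun (j : Nat) => decide ((j : Int) ∈ U))).map
      (fun (j : Nat) => (j : Int))).Nodup :=
    (List.nodup_range.filter _).map (fun a b h => by exact_mod_cast h)
  have hfin : (((List.range L).filter (fun (j : Nat) => decide ((j : Int) ∈ U))).map
      (fun (j : Nat) => (j : Int))).toFinset = U := by
    apply Finset.ext; intro x
    simp only [List.mem_toFinset, List.mem_map, List.mem_filter, List.mem_range,
      decide_eq_true_eq]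
    constructor
    · rintro ⟨j, ⟨hj, hx⟩, rfl⟩; exact hx
    · intro hx
      rcases hU x hx with ⟨h0, hL⟩
      exact ⟨x.toNat, ⟨by omega, by rwa [Int.toNat_of_nonneg h0]⟩, by omega⟩
  calc ((List.range L).filter (fun (j : Nat) => decide ((j : Int) ∈ U))).length
      = (((List.range L).filter (fun (j : Nat) => decide ((j : Int) ∈ U))).map
          (fun (j : Nat) => (j : Int))).length := by rw [List.length_map]
    _ = (((List.range L).filter (fun (j : Nat) => decide ((j : Int) ∈ U))).map
          (fun (j : Nat) => (j : Int))).toFinset.card := (List.toFinset_card_of_nodup hnd).symm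
    _ = U.card := by rw [hfin]

theorem outer_length (n d : Int) (ps : List Int) : ∀ (line : List Bool),
    (ps.foldl (fun line p =>
        (PySem.List.pyRange (max 1 (p - d)) ((min n (p + d)) + 1) 1).foldl
          (fun ln i => ln.set i.toNat true) line) line).length = line.length := by
  induction ps with
  | nil => intro line; rfl
  | cons p ps ih =>
    intro line
    rw [List.foldl_cons, ih, foldl_set_length]

theorem a_eq_card (n k d : Int) (infected : List Int) :
    infec n k infected d
      = ((ivU (infected.map (fun p => (max 1 (p - d), min n (p + d))))).card : Int) := by
  have hUb : ∀ x ∈ ivU (infected.map (fun p => (max 1 (p - d), min n (p + d)))),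
      0 ≤ x ∧ x < (((n + 1).toNat : Nat) : Int) := by
    intro x hx
    rw [mem_ivU] at hx
    rcases hx with ⟨iv, hm, h1, h2⟩
    rw [List.mem_map] at hm
    rcases hm with ⟨p, _, rfl⟩
    simp only at h1 h2
    omega
  show (infected.foldl _ (List.replicate (n + 1).toNat false)).foldl _ 0 = _
  rw [foldl_sum, countP_pos]
  rw [outer_length n d infected (List.replicate (n + 1).toNat false)]
  rw [List.length_replicate]
  have hcount : (List.range (n + 1).toNat).countP
      (fun j => (infected.foldl (fun line p =>
        (PySem.List.pyRange (max 1 (p - d)) ((min n (p + d)) + 1) 1).foldl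
          (fun ln i => ln.set i.toNat true) line) (List.replicate (n + 1).toNat false)).getD j false)
      = (List.range (n + 1).toNat).countP
      (fun (j : Nat) => decide ((j : Int) ∈ ivU (infected.map (fun p => (max 1 (p - d), min n (p + d)))))) := by
    apply List.countP_congr
    intro j hj
    rw [List.mem_range] at hj
    have hc := outer_getD n d infected (List.replicate (n + 1).toNat false) j
    rw [List.getD_replicate _ hj] at hc
    simp only [Bool.false_eq_true, false_or, List.length_replicate] at hc
    rw [hc]
    simp [hj]
  rw [hcount, range_countP_card _ _ hUb]
  simp

-- ===== VERDICT (by name: the statement is the Claim_ definition above) =====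
theorem infec_spec : Claim_equal_infec := by
  intro n k infected d _
  unfold Spec_infec
  rw [a_eq_card, alt_eq_card]
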